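-- pv_equiv track=rewrite | github.com/PurpleSquirrelMedia/blockchain-research | analyze_data.py | analyze_inscription_numbers
-- ===== SOURCE A (Python) =====
-- def analyze_inscription_numbers(records):
--     """Analyze inscription number distribution."""
--     numbers = [r.get('number', 0) for r in records if r.get('number')]
--     if not numbers:
--         return {}
--
--     numbers.sort()
--     return {
--         'earliest': min(numbers),
--         'latest': max(numbers),
--         'range': max(numbers) - min(numbers),
--         'count': len(numbers)
--     }
-- ===== SOURCE B (Python) =====
-- def analyze_inscription_numbers(records):
--     """Analyze inscription number distribution (single pass, no sort)."""
--     earliest = None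
--     latest = None
--     count = 0
--     for r in records:
--         n = r.get('number')
--         if not n:
--             continue
--         if count == 0:
--             earliest = n
--             latest = n
--         else:
--             if n < earliest:
--                 earliest = n
--             if n > latest:
--                 latest = n
--         count += 1
--     if count == 0:
--         return {}
--     return {
--         'earliest': earliest,
--         'latest': latest,
--         'range': latest - earliest,
--         'count': count
--     }
-- ===== Notes on version B (the rewrite author's own statement) =====
-- stated objective: alternative
-- what changed: Replaces the list comprehension + sort + builtin min/max/len with a single fused pass that maintains running earliest/latest/count in an accumulator, building no intermediate list and doing no sort.
import Mathlib
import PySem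

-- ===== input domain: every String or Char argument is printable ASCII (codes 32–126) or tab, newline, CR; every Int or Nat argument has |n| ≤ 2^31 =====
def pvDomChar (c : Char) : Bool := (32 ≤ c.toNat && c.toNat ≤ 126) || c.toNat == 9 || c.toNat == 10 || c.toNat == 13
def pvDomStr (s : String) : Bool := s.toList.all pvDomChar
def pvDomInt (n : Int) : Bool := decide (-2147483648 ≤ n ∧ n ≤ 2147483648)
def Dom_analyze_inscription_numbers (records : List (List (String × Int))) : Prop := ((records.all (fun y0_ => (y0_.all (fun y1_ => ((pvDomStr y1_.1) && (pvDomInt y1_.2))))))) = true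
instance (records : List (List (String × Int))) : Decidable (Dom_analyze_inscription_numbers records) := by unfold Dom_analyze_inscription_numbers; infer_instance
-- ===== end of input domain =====

-- B replaces comprehension + sort + min/max/len by one fused pass with a running
-- earliest/latest/count accumulator (objective: alternative decomposition).

-- ===== PORT A =====
-- r.get('number'): first-match association-list lookup (exact for Python dicts, whose keys are unique)
def pvGetNumber? : List (String × Int) → Option Int
  | [] => none
  | (k, v) :: t => if k = "number" then some v else pvGetNumber? t

def analyze_inscription_numbers (records : List (List (String × Int))) : List (String × Int) :=
  let numbers := (records.filter (fun r => (pvGetNumber? r).getD 0 != 0)).map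
      (fun r => (pvGetNumber? r).getD 0)
  if numbers = [] then []
  else
    let numbers := PySem.List.sorted numbers (fun x => x) false
    [("earliest", (PySem.List.min? numbers (fun x => x)).getD 0),
     ("latest",   (PySem.List.max? numbers (fun x => x)).getD 0),
     ("range",    (PySem.List.max? numbers (fun x => x)).getD 0
                    - (PySem.List.min? numbers (fun x => x)).getD 0),
     ("count",    (numbers.length : Int))]

-- ===== PORT B =====
def altStep (st : Option Int × Option Int × Int) (r : List (String × Int)) :
    Option Int × Option Int × Int :=
  match pvGetNumber? r with
  | none => st
  | some n =>
    if n = 0 then st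
    else
      match st with
      | (e?, l?, c) =>
        if c = 0 then (some n, some n, 1)
        else ((if n < e?.getD 0 then some n else e?),
              (if n > l?.getD 0 then some n else l?),
              c + 1)

def analyze_inscription_numbers_alt (records : List (List (String × Int))) : List (String × Int) :=
  match records.foldl altStep (none, none, 0) with
  | (e?, l?, c) =>
    if c = 0 then []
    else [("earliest", e?.getD 0), ("latest", l?.getD 0),
          ("range", l?.getD 0 - e?.getD 0), ("count", c)]

-- ===== PRECONDITION & SPEC =====
def Spec_analyze_inscription_numbers (records : List (List (String × Int))) (out : List (String × Int)) : Prop := out = analyze_inscription_numbers_alt records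
instance (records : List (List (String × Int))) (out : List (String × Int)) : Decidable (Spec_analyze_inscription_numbers records out) := by unfold Spec_analyze_inscription_numbers; infer_instance

-- ===== CLAIM (what is proved, stated in full; the proofs are below) =====
def Claim_equal_analyze_inscription_numbers : Prop := ∀ (records : List (List (String × Int))), Dom_analyze_inscription_numbers records → Spec_analyze_inscription_numbers records (analyze_inscription_numbers records)

-- ===== LEMMAS AND PROOFS =====

-- the kept numbers, as A's comprehension produces them
def pvNums (records : List (List (String × Int))) : List Int :=
  (records.filter (fun r => (pvGetNumber? r).getD 0 != 0)).map (fun r => (pvGetNumber? r).getD 0)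

theorem pvNums_cons (r : List (String × Int)) (t : List (List (String × Int))) :
    pvNums (r :: t) =
      if (pvGetNumber? r).getD 0 = 0 then pvNums t
      else (pvGetNumber? r).getD 0 :: pvNums t := by
  by_cases h : (pvGetNumber? r).getD 0 = 0
  · simp [pvNums, h]
  · simp [pvNums, h]

theorem fold_nonzero (rs : List (List (String × Int))) :
    ∀ (e l c : Int), 0 < c →
      rs.foldl altStep (some e, some l, c) =
        (some ((pvNums rs).foldl min e), some ((pvNums rs).foldl max l),
         c + (pvNums rs).length) := by
  induction rs with
  | nil => intro e l c hc; simp [pvNums]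
  | cons r t ih =>
    intro e l c hc
    rw [List.foldl_cons, pvNums_cons]
    by_cases h0 : (pvGetNumber? r).getD 0 = 0
    · have hstep : altStep (some e, some l, c) r = (some e, some l, c) := by
        unfold altStep
        cases hg : pvGetNumber? r with
        | none => rfl
        | some n =>
          have : n = 0 := by simpa [hg] using h0
          simp [this]
      rw [hstep, if_pos h0, ih e l c hc]
    · set n := (pvGetNumber? r).getD 0 with hn
      have hg : pvGetNumber? r = some n := by
        cases hg : pvGetNumber? r with
        | none => exact absurd (by simp [hn, hg]) h0
        | some m => simp [hn, hg]
      have hstep : altStep (some e, some l, c) r = (some (min e n), some (max l n), c + 1) := by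
        unfold altStep
        rw [hg]
        have hc' : ¬ c = 0 := by omega
        simp [h0, hc']
        constructor
        · split_ifs with h1 <;> [simp [min_eq_right (le_of_lt h1)]; simp [min_eq_left (by omega : e ≤ n)]]
        · split_ifs with h1 <;> [simp [max_eq_right (le_of_lt h1)]; simp [max_eq_left (by omega : n ≤ l)]]
      rw [hstep, if_neg h0, ih (min e n) (max l n) (c + 1) (by omega)]
      simp [List.foldl_cons]
      omega

theorem fold_zero (rs : List (List (String × Int))) :
    rs.foldl altStep (none, none, 0) =
      match pvNums rs with
      | [] => (none, none, 0)
      | n :: t => (some (t.foldl min n), some (t.foldl max n), 1 + (t.length : Int)) := by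
  induction rs with
  | nil => simp [pvNums]
  | cons r t ih =>
    rw [List.foldl_cons, pvNums_cons]
    by_cases h0 : (pvGetNumber? r).getD 0 = 0
    · have hstep : altStep (none, none, 0) r = (none, none, 0) := by
        unfold altStep
        cases hg : pvGetNumber? r with
        | none => rfl
        | some n =>
          have : n = 0 := by simpa [hg] using h0
          simp [this]
      rw [hstep, if_pos h0, ih]
    · set n := (pvGetNumber? r).getD 0 with hn
      have hg : pvGetNumber? r = some n := by
        cases hg : pvGetNumber? r with
        | none => exact absurd (by simp [hn, hg]) h0
        | some m => simp [hn, hg]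
      have hstep : altStep (none, none, 0) r = (some n, some n, 1) := by
        unfold altStep; rw [hg]; simp [h0]
      rw [hstep, if_neg h0, fold_nonzero t n n 1 (by omega)]

-- min?/max? of a permutation have the same value (key = identity on Int)
theorem min?_id_perm (xs ys : List Int) (h : xs.Perm ys) :
    PySem.List.min? xs (fun x => x) = PySem.List.min? ys (fun x => x) := by
  cases hx : PySem.List.min? xs (fun x => x) with
  | none =>
    have hxn : xs = [] := (PySem.List.min?_eq_none_iff xs (fun x => x)).mp hx
    subst hxn
    have hyn : ys = [] := h.symm.eq_nil
    subst hyn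
    rfl
  | some m =>
    cases hy : PySem.List.min? ys (fun x => x) with
    | none =>
      have hyn : ys = [] := (PySem.List.min?_eq_none_iff ys (fun x => x)).mp hy
      subst hyn
      have hxn : xs = [] := h.eq_nil
      subst hxn
      rw [(PySem.List.min?_eq_none_iff [] (fun x => x)).mpr rfl] at hx
      exact (Option.some_ne_none _ hx.symm).elim
    | some m' =>
      have hm : m ∈ xs := PySem.List.min?_mem hx
      have hm' : m' ∈ ys := PySem.List.min?_mem hy
      have h1 : m ≤ m' := by simpa using PySem.List.min?_isMin hx m' (h.mem_iff.mpr hm')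
      have h2 : m' ≤ m := by simpa using PySem.List.min?_isMin hy m (h.mem_iff.mp hm)
      have : m = m' := le_antisymm h1 h2
      rw [this]

theorem max?_id_perm (xs ys : List Int) (h : xs.Perm ys) :
    PySem.List.max? xs (fun x => x) = PySem.List.max? ys (fun x => x) := by
  cases hx : PySem.List.max? xs (fun x => x) with
  | none =>
    have hxn : xs = [] := (PySem.List.max?_eq_none_iff xs (fun x => x)).mp hx
    subst hxn
    have hyn : ys = [] := h.symm.eq_nil
    subst hyn
    rfl
  | some m =>
    cases hy : PySem.List.max? ys (fun x => x) with
    | none =>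
      have hyn : ys = [] := (PySem.List.max?_eq_none_iff ys (fun x => x)).mp hy
      subst hyn
      have hxn : xs = [] := h.eq_nil
      subst hxn
      rw [(PySem.List.max?_eq_none_iff [] (fun x => x)).mpr rfl] at hx
      exact (Option.some_ne_none _ hx.symm).elim
    | some m' =>
      have hm : m ∈ xs := PySem.List.max?_mem hx
      have hm' : m' ∈ ys := PySem.List.max?_mem hy
      have h1 : m' ≤ m := by simpa using PySem.List.max?_isMax hx m' (h.mem_iff.mpr hm')
      have h2 : m ≤ m' := by simpa using PySem.List.max?_isMax hy m (h.mem_iff.mp hm)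
      have : m = m' := le_antisymm h2 h1
      rw [this]

-- ===== VERDICT (by name: the statement is the Claim_ definition above) =====
theorem analyze_inscription_numbers_spec : Claim_equal_analyze_inscription_numbers := by
  intro records _
  show analyze_inscription_numbers records = analyze_inscription_numbers_alt records
  simp only [analyze_inscription_numbers, analyze_inscription_numbers_alt]
  rw [show ((records.filter (fun r => (pvGetNumber? r).getD 0 != 0)).map
      (fun r => (pvGetNumber? r).getD 0)) = pvNums records from rfl]
  rw [fold_zero records]
  cases hns : pvNums records with
  | nil => simp
  | cons n t =>
    have hperm := PySem.List.sorted_perm (n :: t) (fun x => x) false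
    have hmin : PySem.List.min? (PySem.List.sorted (n :: t) (fun x => x) false) (fun x => x)
        = some (t.foldl min n) :=
      (min?_id_perm _ _ hperm).trans (PySem.List.min?_id_cons n t)
    have hmax : PySem.List.max? (PySem.List.sorted (n :: t) (fun x => x) false) (fun x => x)
        = some (t.foldl max n) :=
      (max?_id_perm _ _ hperm).trans (PySem.List.max?_id_cons n t)
    have hlen : (PySem.List.sorted (n :: t) (fun x => x) false).length = (n :: t).length :=
      hperm.length_eq
    have hc : ¬ (1 + (t.length : Int) = 0) := by omega
    simp [hmin, hmax, hlen, hc]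
    omega
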